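-- pv_equiv track=rewrite | github.com/yodahyun/algorithm | 프로그래머스/lv0/120835. 진료 순서 정하기/진료 순서 정하기.py | solution
-- ===== SOURCE A (Python) =====
-- def solution(emergency):
--     result = []
--
--     sort = sorted(emergency, reverse=True)
--     for k, v in enumerate(emergency):
--         for ek, ev in enumerate(sort):
--             if ev == v:
--                 result.append(ek+1)
--     return result
-- ===== SOURCE B (Python) =====
-- def solution(emergency):
--     s = sorted(emergency, reverse=True)
--     pos = {}
--     for i, x in enumerate(s):
--         pos[x] = pos.get(x, []) + [i + 1]
--     out = []
--     for v in emergency: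
--         out += pos[v]
--     return out
-- ===== Notes on version B (the rewrite author's own statement) =====
-- stated objective: faster
-- what changed: Instead of scanning the whole sorted list for each element (nested loops), B builds a value-to-rank-positions dict from the sorted list once and concatenates O(1) lookups.
import Mathlib
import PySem

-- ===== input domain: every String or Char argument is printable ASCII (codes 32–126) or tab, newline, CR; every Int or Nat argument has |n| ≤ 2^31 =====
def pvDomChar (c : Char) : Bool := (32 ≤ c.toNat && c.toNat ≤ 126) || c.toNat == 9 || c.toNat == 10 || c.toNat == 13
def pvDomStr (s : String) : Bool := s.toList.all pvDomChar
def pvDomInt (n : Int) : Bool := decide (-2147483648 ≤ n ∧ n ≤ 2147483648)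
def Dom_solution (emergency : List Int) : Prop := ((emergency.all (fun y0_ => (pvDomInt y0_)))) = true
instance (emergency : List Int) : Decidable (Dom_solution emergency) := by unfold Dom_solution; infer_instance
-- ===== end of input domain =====

-- B replaces A's nested O(n^2) scan by one sorted pass building a value->ranks dict, then O(1) lookups (faster).


-- ===== PORT A =====
def solution (emergency : List Int) : List Int :=
  let sort := PySem.List.sorted emergency (fun x => x) true
  (PySem.List.enumerate emergency).foldl
    (fun result kv =>
      (PySem.List.enumerate sort).foldl
        (fun r p => if p.2 == kv.2 then r ++ [p.1 + 1] else r) result)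
    []

-- ===== PORT B =====
def solution_alt (emergency : List Int) : List Int :=
  let s := PySem.List.sorted emergency (fun x => x) true
  let pos : PySem.Dict Int (List Int) :=
    (PySem.List.enumerate s).foldl
      (fun d p => d.modify p.2 [] (fun l => l ++ [p.1 + 1])) PySem.Dict.empty
  emergency.foldl (fun out v => out ++ pos.getD v []) []

-- ===== PRECONDITION & SPEC =====
def Spec_solution (emergency : List Int) (out : List Int) : Prop := out = solution_alt emergency
instance (emergency : List Int) (out : List Int) : Decidable (Spec_solution emergency out) := by unfold Spec_solution; infer_instance

-- ===== CLAIM (what is proved, stated in full; the proofs are below) =====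
def Claim_equal_solution : Prop := ∀ (emergency : List Int), Dom_solution emergency → Spec_solution emergency (solution emergency)

-- ===== LEMMAS AND PROOFS =====

-- A's nested loops, flattened: for each v in emergency, the matching ranks from the sorted list.
theorem solution_eq_flatMap (emergency : List Int) :
    solution emergency =
      emergency.flatMap (fun v =>
        ((PySem.List.enumerate (PySem.List.sorted emergency (fun x => x) true)).filter
            (fun p => p.2 == v)).map (fun p => p.1 + 1)) := by
  unfold solution
  rw [PySem.List.foldl_congr_mem (g := fun result kv =>
      result ++ ((PySem.List.enumerate (PySem.List.sorted emergency (fun x => x) true)).filter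
          (fun p => p.2 == kv.2)).map (fun p => p.1 + 1))]
  · rw [PySem.List.foldl_append_eq_flatMap, List.nil_append]
    have h : ∀ (l : List (Int × Int)) (g : Int → List Int),
        l.flatMap (fun kv => g kv.2) = (l.map (fun kv => kv.2)).flatMap g := by
      intro l g; induction l with
      | nil => rfl
      | cons x xs ih => simp [List.flatMap_cons, ih]
    rw [h (PySem.List.enumerate emergency)
        (fun v => ((PySem.List.enumerate (PySem.List.sorted emergency (fun x => x) true)).filter
            (fun p => p.2 == v)).map (fun p => p.1 + 1)),
      PySem.List.map_snd_enumerate]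
  · intro acc x _
    rw [PySem.List.foldl_append_if]

-- B's dict lookup returns exactly those ranks.
theorem pos_getD (s : List Int) (v : Int) :
    ((PySem.List.enumerate s).foldl
        (fun d p => d.modify p.2 [] (fun l => l ++ [p.1 + 1]))
        (PySem.Dict.empty : PySem.Dict Int (List Int))).getD v []
      = ((PySem.List.enumerate s).filter (fun p => p.2 == v)).map (fun p => p.1 + 1) := by
  have hswap :
      (PySem.List.enumerate s).foldl
          (fun d p => d.modify p.2 [] (fun l => l ++ [p.1 + 1]))
          (PySem.Dict.empty : PySem.Dict Int (List Int))
        = ((PySem.List.enumerate s).map (fun p => (p.2, p.1 + 1))).foldl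
            (fun d p => d.modify p.1 [] (fun l => l ++ [p.2])) PySem.Dict.empty := by
    rw [List.foldl_map]
  rw [hswap, PySem.Dict.getD_foldl_modify_append]
  simp [List.filter_map, Function.comp_def, PySem.Dict.getD, PySem.Dict.get?, PySem.Dict.empty]

-- ===== VERDICT (by name: the statement is the Claim_ definition above) =====
theorem solution_spec : Claim_equal_solution := by
  intro emergency _
  unfold Spec_solution solution_alt
  rw [solution_eq_flatMap, PySem.List.foldl_append_eq_flatMap, List.nil_append]
  exact List.flatMap_congr (fun v _ => (pos_getD _ v).symm)
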